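-- pv_equiv track=rewrite | github.com/weiguoPian/MetaTPTrans | parser/token_utils.py | split_identifier_into_parts
-- ===== SOURCE A (Python) =====
-- from typing import List
--
-- def split_camelcase(camel_case_identifier: str) -> List[str]:
--     """
--     Split camelCase identifiers.
--     come from code transformer
--     """
--     if not len(camel_case_identifier):
--         return []
--     # split into words based on adjacent cases being the same
--     result = []
--     current = str(camel_case_identifier[0])
--     prev_upper = camel_case_identifier[0].isupper()
--     prev_digit = camel_case_identifier[0].isdigit()
--     prev_special = not camel_case_identifier[0].isalnum()
--     for c in camel_case_identifier[1:]:
--         upper = c.isupper()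
--         digit = c.isdigit()
--         special = not c.isalnum()
--         new_upper_word = upper and not prev_upper
--         new_digit_word = digit and not prev_digit
--         new_special_word = special and not prev_special
--         if new_digit_word or new_upper_word or new_special_word:
--             result.append(current)
--             current = c
--         elif not upper and prev_upper and len(current) > 1:
--             result.append(current[:-1])
--             current = current[-1] + c
--         elif not digit and prev_digit:
--             result.append(current)
--             current = c
--         elif not special and prev_special:
--             result.append(current)
--             current = c
--         else:
--             current += c
--         prev_digit = digit
--         prev_upper = upper
--         prev_special = special
--     result.append(current)
--     return result
--
-- def split_identifier_into_parts(identifier: str) -> List[str]: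
--     """
--     Split a single identifier into parts on snake_case and camelCase
--     come from code transformer
--     """
--     # if identifier == '<MASK>':
--     #     return [identifier]
--     snake_case = identifier.split("_")
--
--     identifier_parts = []  # type: List[str]
--     for i in range(len(snake_case)):
--         part = snake_case[i]
--         if len(part) > 0:
--             identifier_parts.extend(s.lower() for s in split_camelcase(part))
--     if len(identifier_parts) == 0:
--         return [identifier]
--     return identifier_parts
-- ===== SOURCE B (Python) =====
-- from typing import List
--
-- def _cat(c: str) -> str:
--     if c.isupper():
--         return 'U'
--     if c.isdigit():
--         return 'D'
--     if not c.isalnum():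
--         return 'S'
--     return 'L'
--
-- def _runs(s: str) -> List[tuple]:
--     """Maximal runs of same-category characters (repeated span off the front)."""
--     runs = []
--     while s:
--         k = _cat(s[0])
--         i = 1
--         while i < len(s) and _cat(s[i]) == k:
--             i += 1
--         runs.append((k, s[:i]))
--         s = s[i:]
--     return runs
--
-- def split_identifier_into_parts(identifier: str) -> List[str]:
--     parts = []  # type: List[str]
--     for part in identifier.split("_"):
--         if not part:
--             continue
--         runs = _runs(part)
--         pcat, pending = runs[0]
--         words = []  # type: List[str]
--         for k, run in runs[1:]:
--             if pcat == 'U' and k == 'L':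
--                 if len(pending) > 1:
--                     words.append(pending[:-1])
--                     pending = pending[-1] + run
--                 else:
--                     pending = pending + run
--             else:
--                 words.append(pending)
--                 pending = run
--             pcat = k
--         words.append(pending)
--         parts.extend(w.lower() for w in words)
--     if not parts:
--         return [identifier]
--     return parts
-- ===== Notes on version B (the rewrite author's own statement) =====
-- stated objective: alternative
-- what changed: A's per-character five-flag state machine is replaced by first splitting each snake part into maximal same-category runs (upper/digit/special/lower) and then walking the run list, with an upper run donating its last character to a following lower run.
import Mathlib
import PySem

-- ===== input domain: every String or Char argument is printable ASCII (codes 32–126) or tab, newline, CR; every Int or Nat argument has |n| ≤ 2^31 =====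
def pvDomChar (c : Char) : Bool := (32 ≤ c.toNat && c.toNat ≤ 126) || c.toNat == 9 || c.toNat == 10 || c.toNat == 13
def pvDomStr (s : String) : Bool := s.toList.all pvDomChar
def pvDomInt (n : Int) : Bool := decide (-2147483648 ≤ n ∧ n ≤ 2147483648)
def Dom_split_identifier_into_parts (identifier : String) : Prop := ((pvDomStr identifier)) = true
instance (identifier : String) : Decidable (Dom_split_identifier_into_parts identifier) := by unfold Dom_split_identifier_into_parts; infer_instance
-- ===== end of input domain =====

-- B replaces A's five-flag character-by-character state machine by a run decomposition
-- (maximal same-category runs, then a short walk over the runs); objective: alternative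
-- decomposition, same asymptotic cost.

-- ===== PORT A =====
-- one iteration of split_camelcase's for-loop; state = (result, current, prev_upper, prev_digit, prev_special)
def camelStep (st : List (List Char) × List Char × Bool × Bool × Bool) (c : Char) :
    List (List Char) × List Char × Bool × Bool × Bool :=
  let result := st.1
  let current := st.2.1
  let pu := st.2.2.1
  let pd := st.2.2.2.1
  let ps := st.2.2.2.2
  let upper := PySem.Chars.isupper c
  let digit := PySem.Chars.isdigit c
  let special := !(PySem.Chars.isalnum c)
  if (digit && !pd) || (upper && !pu) || (special && !ps) then
    (result ++ [current], [c], upper, digit, special)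
  else if !upper && pu && decide (1 < current.length) then
    -- current[:-1] and current[-1]: the branch guarantees current is nonempty (length > 1)
    (result ++ [current.dropLast], [current.getLastD ' ', c], upper, digit, special)
  else if !digit && pd then
    (result ++ [current], [c], upper, digit, special)
  else if !special && ps then
    (result ++ [current], [c], upper, digit, special)
  else
    (result, current ++ [c], upper, digit, special)

def split_camelcase (cs : List Char) : List (List Char) :=
  match cs with
  | [] => []
  | c :: rest =>
    let st := rest.foldl camelStep
      ([], [c], PySem.Chars.isupper c, PySem.Chars.isdigit c, !(PySem.Chars.isalnum c))
    st.1 ++ [st.2.1]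

def split_identifier_into_parts (identifier : String) : List String :=
  let snake := PySem.Chars.splitOn identifier.toList ['_']
  let parts := snake.foldl (fun acc part =>
    if 0 < part.length then
      acc ++ (split_camelcase part).map (fun w => String.ofList (PySem.Chars.lower w))
    else acc) []
  if parts.length = 0 then [identifier] else parts

-- ===== PORT B =====
-- character category: 'U' upper, 'D' digit, 'S' special, 'L' lower
def catOf (c : Char) : Char :=
  if PySem.Chars.isupper c then 'U'
  else if PySem.Chars.isdigit c then 'D'
  else if !(PySem.Chars.isalnum c) then 'S'
  else 'L'

-- maximal runs of same-category characters (Source B's recursive span-based _runs)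
def runsOf : List Char → List (Char × List Char)
  | [] => []
  | c :: rest =>
    (catOf c, c :: rest.takeWhile (fun x => catOf x == catOf c)) ::
      runsOf (rest.dropWhile (fun x => catOf x == catOf c))
termination_by cs => cs.length
decreasing_by
  simp only [List.length_cons]
  exact Nat.lt_succ_of_le (List.length_dropWhile_le _ _)

-- Source B's loop over runs[1:]: carry a pending word; an upper run followed by a lower run
-- donates its last character to the lower word
def walk : List (Char × List Char) → List Char → Char → List (List Char)
  | [], pending, _ => [pending]
  | (k, run) :: rs, pending, pcat =>
    if pcat == 'U' && k == 'L' then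
      if 1 < pending.length then
        pending.dropLast :: walk rs (pending.getLastD ' ' :: run) k
      else
        walk rs (pending ++ run) k
    else
      pending :: walk rs run k

-- words of one nonempty snake part (the [] case is unreachable: parts are nonempty)
def partWords (cs : List Char) : List (List Char) :=
  match runsOf cs with
  | [] => []
  | (k, r) :: rs => walk rs r k

def split_identifier_into_parts_alt (identifier : String) : List String :=
  let parts := (PySem.Chars.splitOn identifier.toList ['_']).foldl (fun acc part =>
    if part = [] then acc
    else acc ++ (partWords part).map (fun w => String.ofList (PySem.Chars.lower w))) []
  if parts = [] then [identifier] else parts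

-- ===== PRECONDITION & SPEC =====
def Spec_split_identifier_into_parts (identifier : String) (out : List String) : Prop := out = split_identifier_into_parts_alt identifier
instance (identifier : String) (out : List String) : Decidable (Spec_split_identifier_into_parts identifier out) := by unfold Spec_split_identifier_into_parts; infer_instance

-- ===== CLAIM (what is proved, stated in full; the proofs are below) =====
def Claim_equal_split_identifier_into_parts : Prop := ∀ (identifier : String), Dom_split_identifier_into_parts identifier → Spec_split_identifier_into_parts identifier (split_identifier_into_parts identifier)

-- ===== LEMMAS AND PROOFS =====

-- ASCII range facts: an upper-case letter is neither a digit nor lower-case, a digit is not lower-case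
lemma char_flags (c : Char) :
    (PySem.Chars.isupper c = true → PySem.Chars.isdigit c = false ∧ PySem.Chars.islower c = false) ∧
    (PySem.Chars.isdigit c = true → PySem.Chars.islower c = false) := by
  simp only [PySem.Chars.isupper, PySem.Chars.isdigit, PySem.Chars.islower, Char.le_def,
    UInt32.le_iff_toNat_le, Bool.and_eq_true, decide_eq_true_eq,
    Bool.and_eq_false_iff, decide_eq_false_iff_not, not_le,
    show ('A'.val.toNat) = 65 from rfl, show ('Z'.val.toNat) = 90 from rfl,
    show ('0'.val.toNat) = 48 from rfl, show ('9'.val.toNat) = 57 from rfl,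
    show ('a'.val.toNat) = 97 from rfl, show ('z'.val.toNat) = 122 from rfl]
  omega

-- each of A's three flags is a function of the character's category
lemma upper_eq (c : Char) : PySem.Chars.isupper c = (catOf c == 'U') := by
  obtain ⟨h1, h2⟩ := char_flags c
  unfold catOf; split_ifs <;> simp_all [PySem.Chars.isalnum, PySem.Chars.isalpha]

lemma digit_eq (c : Char) : PySem.Chars.isdigit c = (catOf c == 'D') := by
  obtain ⟨h1, h2⟩ := char_flags c
  unfold catOf; split_ifs <;> simp_all [PySem.Chars.isalnum, PySem.Chars.isalpha]

lemma special_eq (c : Char) : (!(PySem.Chars.isalnum c)) = (catOf c == 'S') := by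
  obtain ⟨h1, h2⟩ := char_flags c
  unfold catOf; split_ifs <;> simp_all [PySem.Chars.isalnum, PySem.Chars.isalpha]

lemma cat_cases (c : Char) : catOf c = 'U' ∨ catOf c = 'D' ∨ catOf c = 'S' ∨ catOf c = 'L' := by
  unfold catOf; split_ifs <;> simp

-- head of a dropWhile fails the predicate (general fact; no library lemma found by exact?)
lemma head?_dropWhile {α : Type} (p : α → Bool) (l : List α) (x : α)
    (h : (l.dropWhile p).head? = some x) : p x = false := by
  induction l with
  | nil => simp at h
  | cons a l ih =>
    rw [List.dropWhile_cons] at h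
    split at h
    · exact ih h
    · simp_all

-- walk's two defining equations, as rewrite rules
lemma walk_nil (pending : List Char) (pcat : Char) : walk [] pending pcat = [pending] := rfl

lemma walk_cons (kk : Char) (run : List Char) (rs : List (Char × List Char))
    (pending : List Char) (pcat : Char) :
    walk ((kk, run) :: rs) pending pcat =
    if pcat == 'U' && kk == 'L' then
      (if 1 < pending.length then pending.dropLast :: walk rs (pending.getLastD ' ' :: run) kk
       else walk rs (pending ++ run) kk)
    else pending :: walk rs run kk := rfl

-- a character of the same category as the previous one is appended to current
lemma step_same (res : List (List Char)) (cur : List Char) (x : Char) :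
    camelStep (res, cur, PySem.Chars.isupper x, PySem.Chars.isdigit x, !(PySem.Chars.isalnum x)) x =
    (res, cur ++ [x], PySem.Chars.isupper x, PySem.Chars.isdigit x, !(PySem.Chars.isalnum x)) := by
  simp [camelStep]

-- consuming a whole same-category run appends it to current
lemma consume (k : Char) (r : List Char) (h : ∀ x ∈ r, catOf x = k)
    (res : List (List Char)) (cur : List Char) :
    r.foldl camelStep (res, cur, k == 'U', k == 'D', k == 'S') =
    (res, cur ++ r, k == 'U', k == 'D', k == 'S') := by
  induction r generalizing cur with
  | nil => simp
  | cons x r' ih =>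
    have hx : catOf x = k := h x List.mem_cons_self
    rw [List.foldl_cons, ← hx, ← upper_eq x, ← digit_eq x, ← special_eq x, step_same,
      upper_eq x, digit_eq x, special_eq x, hx,
      ih (fun y hy => h y (List.mem_cons_of_mem _ hy))]
    simp

-- at a run boundary A flushes, except upper→lower which peels the last upper character
lemma step_boundary (res : List (List Char)) (cur : List Char) (k c : Char)
    (hk : k = 'U' ∨ k = 'D' ∨ k = 'S' ∨ k = 'L') (hne : catOf c ≠ k) :
    camelStep (res, cur, k == 'U', k == 'D', k == 'S') c =
    (if k = 'U' ∧ catOf c = 'L' then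
      (if 1 < cur.length then
        (res ++ [cur.dropLast], [cur.getLastD ' ', c],
          PySem.Chars.isupper c, PySem.Chars.isdigit c, !(PySem.Chars.isalnum c))
      else
        (res, cur ++ [c], PySem.Chars.isupper c, PySem.Chars.isdigit c, !(PySem.Chars.isalnum c)))
    else
      (res ++ [cur], [c], PySem.Chars.isupper c, PySem.Chars.isdigit c, !(PySem.Chars.isalnum c))) := by
  rcases hk with hk | hk | hk | hk <;> rcases cat_cases c with hc | hc | hc | hc <;>
    subst hk <;> first
      | exact absurd hc hne
      | (simp only [camelStep, upper_eq c, digit_eq c, special_eq c, hc]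
         simp)

set_option maxRecDepth 8192 in
-- main invariant: from a pending word whose run has category k, A's fold over the rest of
-- the part equals B's walk over the runs of the rest
lemma main_inv (n : Nat) : ∀ cs : List Char, cs.length ≤ n →
    ∀ (k : Char) (res : List (List Char)) (cur : List Char),
    (k = 'U' ∨ k = 'D' ∨ k = 'S' ∨ k = 'L') →
    (∀ x, cs.head? = some x → catOf x ≠ k) →
    (let st := cs.foldl camelStep (res, cur, k == 'U', k == 'D', k == 'S')
     st.1 ++ [st.2.1]) = res ++ walk (runsOf cs) cur k := by
  induction n with
  | zero =>
    intro cs hlen k res cur _ _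
    have : cs = [] := List.length_eq_zero_iff.mp (Nat.le_zero.mp hlen)
    subst this
    simp [runsOf, walk_nil]
  | succ n ih =>
    intro cs hlen k res cur hk hhead
    match cs with
    | [] => simp [runsOf, walk_nil]
    | c :: rest =>
      have hcne : catOf c ≠ k := hhead c rfl
      have hsplit : rest = rest.takeWhile (fun x => catOf x == catOf c) ++
          rest.dropWhile (fun x => catOf x == catOf c) :=
        (List.takeWhile_append_dropWhile).symm
      have hrun : ∀ x ∈ rest.takeWhile (fun x => catOf x == catOf c), catOf x = catOf c :=
        fun x hx => by simpa using List.mem_takeWhile_imp hx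
      have hlen' : (rest.dropWhile (fun x => catOf x == catOf c)).length ≤ n := by
        have h1 := List.length_dropWhile_le (fun x => catOf x == catOf c) rest
        simp only [List.length_cons] at hlen
        omega
      have hhead' : ∀ x, (rest.dropWhile (fun x => catOf x == catOf c)).head? = some x →
          catOf x ≠ catOf c := by
        intro x hx
        have := head?_dropWhile _ _ _ hx
        simpa using this
      rw [runsOf, walk_cons]
      conv_lhs => rw [hsplit]
      rw [show c :: (rest.takeWhile (fun x => catOf x == catOf c) ++
            rest.dropWhile (fun x => catOf x == catOf c)) =
          ([c] ++ rest.takeWhile (fun x => catOf x == catOf c)) ++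
            rest.dropWhile (fun x => catOf x == catOf c) by simp]
      rw [List.foldl_append, List.foldl_append, List.foldl_cons, List.foldl_nil,
        step_boundary res cur k c hk hcne]
      by_cases hUL : k = 'U' ∧ catOf c = 'L'
      · have hwalk : (k == 'U' && catOf c == 'L') = true := by simp [hUL.1, hUL.2]
        rw [if_pos hUL, if_pos hwalk]
        by_cases hcurlen : 1 < cur.length
        · simp only [if_pos hcurlen]
          rw [upper_eq c, digit_eq c, special_eq c, consume (catOf c) _ hrun,
            ih _ hlen' (catOf c) _ _ (cat_cases c) hhead']
          simp only [List.append_assoc, List.cons_append, List.nil_append]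
        · simp only [if_neg hcurlen]
          rw [upper_eq c, digit_eq c, special_eq c, consume (catOf c) _ hrun,
            ih _ hlen' (catOf c) _ _ (cat_cases c) hhead']
          simp only [List.append_assoc, List.cons_append, List.nil_append]
      · have hwalk : ¬ ((k == 'U' && catOf c == 'L') = true) := by
          simp only [Bool.and_eq_true, beq_iff_eq]
          exact fun h => hUL ⟨h.1, h.2⟩
        rw [if_neg hUL, if_neg hwalk, upper_eq c, digit_eq c,
          special_eq c, consume (catOf c) _ hrun,
          ih _ hlen' (catOf c) _ _ (cat_cases c) hhead']
        simp only [List.append_assoc, List.cons_append, List.nil_append]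

lemma camel_eq (cs : List Char) : split_camelcase cs = partWords cs := by
  match cs with
  | [] => simp [split_camelcase, partWords, runsOf]
  | c :: rest =>
    have hA : split_camelcase (c :: rest) =
        (let st := rest.foldl camelStep
          ([], [c], PySem.Chars.isupper c, PySem.Chars.isdigit c, !(PySem.Chars.isalnum c))
         st.1 ++ [st.2.1]) := rfl
    have hB : partWords (c :: rest) =
        walk (runsOf (rest.dropWhile (fun x => catOf x == catOf c)))
          (c :: rest.takeWhile (fun x => catOf x == catOf c)) (catOf c) := by
      unfold partWords
      rw [runsOf]
    have hsplit : rest = rest.takeWhile (fun x => catOf x == catOf c) ++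
        rest.dropWhile (fun x => catOf x == catOf c) :=
      (List.takeWhile_append_dropWhile).symm
    have hrun : ∀ x ∈ rest.takeWhile (fun x => catOf x == catOf c), catOf x = catOf c :=
      fun x hx => by simpa using List.mem_takeWhile_imp hx
    have hhead' : ∀ x, (rest.dropWhile (fun x => catOf x == catOf c)).head? = some x →
        catOf x ≠ catOf c := by
      intro x hx
      have := head?_dropWhile _ _ _ hx
      simpa using this
    rw [hA, hB]
    conv_lhs => rw [hsplit]
    rw [List.foldl_append, upper_eq c, digit_eq c, special_eq c,
      consume (catOf c) _ hrun,
      main_inv (rest.dropWhile (fun x => catOf x == catOf c)).length _ le_rfl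
        (catOf c) _ _ (cat_cases c) hhead']
    simp

-- ===== VERDICT (by name: the statement is the Claim_ definition above) =====
theorem split_identifier_into_parts_spec : Claim_equal_split_identifier_into_parts := by
  intro identifier _
  unfold Spec_split_identifier_into_parts split_identifier_into_parts split_identifier_into_parts_alt
  have hstep : (fun (acc : List String) (part : List Char) =>
      if 0 < part.length then
        acc ++ (split_camelcase part).map (fun w => String.ofList (PySem.Chars.lower w))
      else acc) =
    (fun (acc : List String) (part : List Char) =>
      if part = [] then acc
      else acc ++ (partWords part).map (fun w => String.ofList (PySem.Chars.lower w))) := by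
    funext acc part
    rw [camel_eq]
    by_cases h : part = []
    · simp [h]
    · simp [h, List.length_pos_iff.mpr h]
  rw [hstep]
  simp only [List.length_eq_zero_iff]
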